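-- pv_equiv track=rewrite | github.com/AI1379/math_model_2026 | problems/B/调整机制.py | compute_c3_pair
-- ===== SOURCE A (Python) =====
-- from collections import defaultdict
--
-- def compute_c3_pair(groups, county_to_city):
--     """计算总C3冲突对数 ∑ C(n,2)"""
--     total = 0
--     for g in groups:
--         cnt = defaultdict(int)
--         for t in g:
--             if t in county_to_city:
--                 cnt[county_to_city[t]] += 1
--         for n in cnt.values():
--             if n >= 2:
--                 total += n * (n - 1) // 2
--     return total
-- ===== SOURCE B (Python) =====
-- from collections import defaultdict
--
-- def compute_c3_pair(groups, county_to_city):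
--     """计算总C3冲突对数 ∑ C(n,2) — counted online: each new member of a city
--     pairs with all earlier members of the same city in the group."""
--     total = 0
--     for g in groups:
--         cnt = defaultdict(int)
--         for t in g:
--             if t in county_to_city:
--                 c = county_to_city[t]
--                 total += cnt[c]
--                 cnt[c] += 1
--     return total
-- ===== Notes on version B (the rewrite author's own statement) =====
-- stated objective: simpler
-- what changed: Pairs are counted online inside the single element loop (each new member of a city adds the city's current count, using C(n,2)=0+1+...+(n-1)), removing A's second loop over cnt.values() and the n*(n-1)//2 closed form.
import Mathlib
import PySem

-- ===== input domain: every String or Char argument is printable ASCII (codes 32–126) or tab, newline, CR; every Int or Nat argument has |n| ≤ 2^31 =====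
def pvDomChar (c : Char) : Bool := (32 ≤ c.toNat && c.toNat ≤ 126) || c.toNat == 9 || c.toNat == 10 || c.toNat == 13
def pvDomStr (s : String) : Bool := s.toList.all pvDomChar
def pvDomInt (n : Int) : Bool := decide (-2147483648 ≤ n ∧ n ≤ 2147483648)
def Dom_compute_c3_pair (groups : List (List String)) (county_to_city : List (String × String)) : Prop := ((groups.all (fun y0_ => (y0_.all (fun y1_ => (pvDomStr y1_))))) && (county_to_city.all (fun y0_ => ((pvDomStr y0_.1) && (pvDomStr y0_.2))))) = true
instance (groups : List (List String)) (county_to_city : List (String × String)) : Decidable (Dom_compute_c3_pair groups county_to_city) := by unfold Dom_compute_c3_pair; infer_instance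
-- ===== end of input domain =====

-- B counts the C(n,2) pairs online inside the single element loop (each new member of a
-- city adds the city's current count), dropping A's second loop over cnt.values() and the
-- n*(n-1)//2 closed form; objective: simpler.

-- ===== PORT A =====
def compute_c3_pair (groups : List (List String)) (county_to_city : List (String × String)) : Int :=
  groups.foldl (fun total g =>
    let cnt : PySem.Dict String Int :=
      g.foldl (fun cnt t =>
        match (PySem.Dict.mk county_to_city).get? t with
        | some c => cnt.modify c 0 (· + 1)
        | none => cnt) PySem.Dict.empty
    cnt.values.foldl (fun total n =>
      if 2 ≤ n then total + PySem.Int.floordiv (n * (n - 1)) 2 else total) total) 0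

-- ===== PORT B =====
def compute_c3_pair_alt (groups : List (List String)) (county_to_city : List (String × String)) : Int :=
  groups.foldl (fun total g =>
    (g.foldl (fun (p : Int × PySem.Dict String Int) t =>
        match (PySem.Dict.mk county_to_city).get? t with
        | some c => (p.1 + p.2.getD c 0, p.2.modify c 0 (· + 1))
        | none => p) (total, PySem.Dict.empty)).1) 0

-- ===== PRECONDITION & SPEC =====
def Spec_compute_c3_pair (groups : List (List String)) (county_to_city : List (String × String)) (out : Int) : Prop := out = compute_c3_pair_alt groups county_to_city
instance (groups : List (List String)) (county_to_city : List (String × String)) (out : Int) : Decidable (Spec_compute_c3_pair groups county_to_city out) := by unfold Spec_compute_c3_pair; infer_instance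

-- ===== CLAIM (what is proved, stated in full; the proofs are below) =====
def Claim_equal_compute_c3_pair : Prop := ∀ (groups : List (List String)) (county_to_city : List (String × String)), Dom_compute_c3_pair groups county_to_city → Spec_compute_c3_pair groups county_to_city (compute_c3_pair groups county_to_city)

-- ===== LEMMAS AND PROOFS =====

-- the C(n,2) summand of A's second pass
def pvF (n : Int) : Int := if 2 ≤ n then PySem.Int.floordiv (n * (n - 1)) 2 else 0

-- the per-group value of A's second pass, as a function of the looked-up city list
def pvS (xs : List String) : Int := (((PySem.Dict.counter xs).values).map pvF).sum

lemma pvF_succ (c : Int) (hc : 0 ≤ c) : pvF (c + 1) = pvF c + c := by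
  unfold pvF
  by_cases h2 : 2 ≤ c
  · rw [if_pos (by omega), if_pos h2,
      PySem.Int.floordiv_eq_ediv_of_pos (by norm_num),
      PySem.Int.floordiv_eq_ediv_of_pos (by norm_num)]
    obtain ⟨k, hk⟩ := Int.even_mul_succ_self (c - 1)
    rw [show (c + 1) * (c + 1 - 1) = 2 * (k + c) from by linear_combination hk,
      show c * (c - 1) = 2 * k from by linear_combination hk,
      Int.mul_ediv_cancel_left _ (by norm_num), Int.mul_ediv_cancel_left _ (by norm_num)]
  · have : c = 0 ∨ c = 1 := by omega
    rcases this with h | h <;> subst h <;> decide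

lemma pvSum_update {L : List String} {x : String} (hnd : L.Nodup) (hx : x ∈ L)
    (g g' : String → Int) (hoff : ∀ k ∈ L, k ≠ x → g' k = g k) :
    (L.map g').sum = (L.map g).sum + g' x - g x := by
  induction L with
  | nil => cases hx
  | cons b M ih =>
    rcases List.mem_cons.1 hx with h | h
    · have hnot : x ∉ M := h ▸ (List.nodup_cons.1 hnd).1
      have hm : M.map g' = M.map g := List.map_congr_left (fun k hk =>
        hoff k (List.mem_cons_of_mem _ hk) (fun he => hnot (he ▸ hk)))
      rw [List.map_cons, List.map_cons, List.sum_cons, List.sum_cons, hm, h]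
      ring
    · have hbx : b ≠ x := fun he => ((List.nodup_cons.1 hnd).1) (he ▸ h)
      have hgb : g' b = g b := hoff b List.mem_cons_self hbx
      have hih := ih (List.nodup_cons.1 hnd).2 h
        (fun k hk hkx => hoff k (List.mem_cons_of_mem _ hk) hkx)
      rw [List.map_cons, List.map_cons, List.sum_cons, List.sum_cons, hih, hgb]
      ring

lemma pvS_eq (xs : List String) :
    pvS xs = ((PySem.Set.ofList xs).map (fun k => pvF (List.count k xs))).sum := by
  unfold pvS
  rw [PySem.Dict.values_eq_map_keys _ (PySem.Dict.nodup_keys_counter xs) 0,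
    PySem.Dict.keys_counter, List.map_map]
  congr 1
  refine List.map_congr_left (fun k _ => ?_)
  simp [PySem.Dict.getD_counter]

lemma pvS_snoc (xs : List String) (x : String) :
    pvS (xs ++ [x]) = pvS xs + (List.count x xs : Int) := by
  rw [pvS_eq, pvS_eq, PySem.Set.ofList_append_singleton]
  unfold PySem.Set.add
  by_cases hmem : x ∈ xs
  · have hc : (PySem.Set.ofList xs).contains x = true := by
      simp [PySem.Set.mem_ofList]; exact hmem
    rw [if_pos hc]
    rw [pvSum_update (PySem.Set.nodup_ofList xs) ((PySem.Set.mem_ofList xs x).2 hmem)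
      (fun k => pvF (List.count k xs)) (fun k => pvF (List.count k (xs ++ [x])))
      (fun k _ hkx => by
        have hxk : x ≠ k := Ne.symm hkx
        simp [List.count_append, hxk])]
    have hcount : List.count x (xs ++ [x]) = List.count x xs + 1 := by
      simp [List.count_append]
    rw [hcount]
    push_cast
    rw [pvF_succ _ (by positivity)]
    ring
  · have hc : (PySem.Set.ofList xs).contains x = false := by
      simp [PySem.Set.mem_ofList]; exact hmem
    rw [if_neg (by simp; exact hmem)]
    have hmap : (PySem.Set.ofList xs).map (fun k => pvF (List.count k (xs ++ [x])))
        = (PySem.Set.ofList xs).map (fun k => pvF (List.count k xs)) := by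
      refine List.map_congr_left (fun k hk => ?_)
      have hxk : x ≠ k := fun he => hmem (he ▸ (PySem.Set.mem_ofList xs k).1 hk)
      simp [List.count_append, hxk]
    rw [List.map_append, List.sum_append, hmap]
    have hx0 : List.count x xs = 0 := List.count_eq_zero.2 hmem
    norm_num [List.count_append, hx0, pvF]

-- A's counting loop over a group equals the counter of the looked-up city list
lemma pvA_inner (lk : String → Option String) :
    ∀ (g : List String) (d : PySem.Dict String Int),
      g.foldl (fun cnt t =>
        match lk t with
        | some c => cnt.modify c 0 (· + 1)
        | none => cnt) d
      = (g.filterMap lk).foldl (fun cnt c => cnt.modify c 0 (· + 1)) d := by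
  intro g
  induction g with
  | nil => intro d; rfl
  | cons a g ih =>
    intro d
    cases h : lk a <;> simp [List.foldl_cons, h, ih]

-- A's second pass is the sum of pvF over the values
lemma pvA_pass (vs : List Int) (t : Int) :
    vs.foldl (fun total n =>
      if 2 ≤ n then total + PySem.Int.floordiv (n * (n - 1)) 2 else total) t
    = t + (vs.map pvF).sum := by
  have h : (fun (total n : Int) =>
      if 2 ≤ n then total + PySem.Int.floordiv (n * (n - 1)) 2 else total)
      = fun total n => total + pvF n := by
    funext total n
    unfold pvF
    split_ifs <;> simp
  rw [h, PySem.List.foldl_add]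

-- B's loop over a group equals the same loop over the looked-up city list
lemma pvB_inner (lk : String → Option String) :
    ∀ (g : List String) (p : Int × PySem.Dict String Int),
      g.foldl (fun p t =>
        match lk t with
        | some c => (p.1 + p.2.getD c 0, p.2.modify c 0 (· + 1))
        | none => p) p
      = (g.filterMap lk).foldl
          (fun p c => (p.1 + p.2.getD c 0, p.2.modify c 0 (· + 1))) p := by
  intro g
  induction g with
  | nil => intro p; rfl
  | cons a g ih =>
    intro p
    cases h : lk a <;> simp [List.foldl_cons, h, ih]

lemma pvB_snd : ∀ (xs : List String) (p : Int × PySem.Dict String Int),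
    (xs.foldl (fun p c => (p.1 + p.2.getD c 0, p.2.modify c 0 (· + 1))) p).2
    = xs.foldl (fun d c => d.modify c 0 (· + 1)) p.2 := by
  intro xs
  induction xs with
  | nil => intro p; rfl
  | cons a xs ih => intro p; simp [List.foldl_cons, ih]

-- the online pair count over the city list equals the sum of C(n,2) over the counts
lemma pvB_cities (xs : List String) (t : Int) :
    (xs.foldl (fun p c => (p.1 + p.2.getD c 0, p.2.modify c 0 (· + 1)))
      (t, (PySem.Dict.empty : PySem.Dict String Int))).1 = t + pvS xs := by
  induction xs using List.reverseRecOn with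
  | nil =>
    have h0 : pvS [] = 0 := rfl
    simp [h0]
  | append_singleton xs x ih =>
    rw [List.foldl_append, List.foldl_cons, List.foldl_nil]
    have hsnd := pvB_snd xs (t, (PySem.Dict.empty : PySem.Dict String Int))
    rw [show (xs.foldl (fun d c => d.modify c 0 (· + 1)) (PySem.Dict.empty : PySem.Dict String Int))
        = PySem.Dict.counter xs from (PySem.Dict.counter_eq_foldl xs).symm] at hsnd
    simp only [hsnd, ih, PySem.Dict.getD_counter, pvS_snoc]
    ring

-- ===== VERDICT (by name: the statement is the Claim_ definition above) =====
theorem compute_c3_pair_spec : Claim_equal_compute_c3_pair := by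
  intro groups county_to_city _
  unfold Spec_compute_c3_pair compute_c3_pair compute_c3_pair_alt
  have hfun : (fun (total : Int) (g : List String) =>
      let cnt : PySem.Dict String Int :=
        g.foldl (fun cnt t =>
          match (PySem.Dict.mk county_to_city).get? t with
          | some c => cnt.modify c 0 (· + 1)
          | none => cnt) PySem.Dict.empty
      cnt.values.foldl (fun total n =>
        if 2 ≤ n then total + PySem.Int.floordiv (n * (n - 1)) 2 else total) total)
      = fun (total : Int) (g : List String) =>
      (g.foldl (fun (p : Int × PySem.Dict String Int) t =>
          match (PySem.Dict.mk county_to_city).get? t with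
          | some c => (p.1 + p.2.getD c 0, p.2.modify c 0 (· + 1))
          | none => p) (total, PySem.Dict.empty)).1 := by
    funext total g
    rw [pvA_inner, pvB_inner, pvA_pass, pvB_cities,
      show ((g.filterMap ((PySem.Dict.mk county_to_city).get?)).foldl
          (fun cnt c => cnt.modify c 0 (· + 1)) PySem.Dict.empty)
        = PySem.Dict.counter (g.filterMap ((PySem.Dict.mk county_to_city).get?))
        from (PySem.Dict.counter_eq_foldl _).symm]
    rfl
  rw [hfun]
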